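-- pv_equiv track=rewrite | github.com/ccctw-ma/leetcode | src/Match/match269-300/289.py | maxTrailingZeros
-- ===== SOURCE A (Python) =====
-- from typing import List
--
-- def maxTrailingZeros(grid: List[List[int]]) -> int:
--     m, n = len(grid), len(grid[0])
--     pre_sum_two = [[[0, 0] for _ in range(n + 1)] for _ in range(m + 1)]
--     pre_sum_five = [[[0, 0] for _ in range(n + 1)] for _ in range(m + 1)]
--     twos = [[0] * n for _ in range(m)]
--     fives = [[0] * n for _ in range(m)]
--     for i in range(m):
--         for j in range(n):
--             two, five = 0, 0
--             while grid[i][j] % 2 == 0: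
--                 two += 1
--                 grid[i][j] //= 2
--             while grid[i][j] % 5 == 0:
--                 five += 1
--                 grid[i][j] //= 5
--             pre_sum_two[i + 1][j + 1][0] = pre_sum_two[i][j + 1][0] + two
--             pre_sum_two[i + 1][j + 1][1] = pre_sum_two[i + 1][j][1] + two
--             pre_sum_five[i + 1][j + 1][0] = pre_sum_five[i][j + 1][0] + five
--             pre_sum_five[i + 1][j + 1][1] = pre_sum_five[i + 1][j][1] + five
--             twos[i][j] = two
--             fives[i][j] = five
--     res = 0
--     for i in range(m):
--         for j in range(n):
--             ul = min(pre_sum_two[i + 1][j + 1][0] + pre_sum_two[i + 1][j + 1][1] - twos[i][j],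
--                      pre_sum_five[i + 1][j + 1][0] + pre_sum_five[i + 1][j + 1][1] - fives[i][j])
--             ur = min(pre_sum_two[i + 1][j + 1][0] + pre_sum_two[i + 1][n][1] - pre_sum_two[i + 1][j + 1][1],
--                      pre_sum_five[i + 1][j + 1][0] + pre_sum_five[i + 1][n][1] - pre_sum_five[i + 1][j + 1][1])
--             dl = min(pre_sum_two[m][j + 1][0] - pre_sum_two[i + 1][j + 1][0] + pre_sum_two[i + 1][j + 1][1],
--                      pre_sum_five[m][j + 1][0] - pre_sum_five[i + 1][j + 1][0] + pre_sum_five[i + 1][j + 1][1])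
--             dr = min(pre_sum_two[m][j + 1][0] - pre_sum_two[i + 1][j + 1][0] + pre_sum_two[i + 1][n][1] -
--                      pre_sum_two[i + 1][j + 1][1] + twos[i][j],
--                      pre_sum_five[m][j + 1][0] - pre_sum_five[i + 1][j + 1][0] + pre_sum_five[i + 1][n][1] -
--                      pre_sum_five[i + 1][j + 1][1] + fives[i][j])
--             res = max(res, max([ul, ur, dl, dr]))
--     return res
-- ===== SOURCE B (Python) =====
-- from typing import List
--
-- def maxTrailingZeros(grid: List[List[int]]) -> int:
--     m, n = len(grid), len(grid[0])
--     twos = [[0] * n for _ in range(m)]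
--     fives = [[0] * n for _ in range(m)]
--     for i in range(m):
--         for j in range(n):
--             v = grid[i][j]
--             two = 0
--             while v % 2 == 0:
--                 two += 1
--                 v //= 2
--             five = 0
--             while v % 5 == 0:
--                 five += 1
--                 v //= 5
--             grid[i][j] = v
--             twos[i][j] = two
--             fives[i][j] = five
--     res = 0
--     for i in range(m):
--         for j in range(n):
--             # the four L-shaped paths through (i, j): scan the column leg and
--             # the row leg directly (the corner cell is in both legs, hence -t/-f)
--             u2 = sum(twos[k][j] for k in range(i + 1))
--             u5 = sum(fives[k][j] for k in range(i + 1))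
--             d2 = sum(twos[k][j] for k in range(i, m))
--             d5 = sum(fives[k][j] for k in range(i, m))
--             l2 = sum(twos[i][k] for k in range(j + 1))
--             l5 = sum(fives[i][k] for k in range(j + 1))
--             r2 = sum(twos[i][k] for k in range(j, n))
--             r5 = sum(fives[i][k] for k in range(j, n))
--             t, f = twos[i][j], fives[i][j]
--             best = max(min(u2 + l2 - t, u5 + l5 - f),
--                        min(u2 + r2 - t, u5 + r5 - f),
--                        min(d2 + l2 - t, d5 + l5 - f),
--                        min(d2 + r2 - t, d5 + r5 - f))
--             res = max(res, best)
--     return res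
-- ===== Notes on version B (the rewrite author's own statement) =====
-- stated objective: alternative
-- what changed: B drops A's two (m+1)x(n+1) prefix-sum tables and instead, for each cell, directly scans the column leg and the row leg of each of the four L-shaped paths, summing the 2- and 5-exponents on the spot.
import Mathlib
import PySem

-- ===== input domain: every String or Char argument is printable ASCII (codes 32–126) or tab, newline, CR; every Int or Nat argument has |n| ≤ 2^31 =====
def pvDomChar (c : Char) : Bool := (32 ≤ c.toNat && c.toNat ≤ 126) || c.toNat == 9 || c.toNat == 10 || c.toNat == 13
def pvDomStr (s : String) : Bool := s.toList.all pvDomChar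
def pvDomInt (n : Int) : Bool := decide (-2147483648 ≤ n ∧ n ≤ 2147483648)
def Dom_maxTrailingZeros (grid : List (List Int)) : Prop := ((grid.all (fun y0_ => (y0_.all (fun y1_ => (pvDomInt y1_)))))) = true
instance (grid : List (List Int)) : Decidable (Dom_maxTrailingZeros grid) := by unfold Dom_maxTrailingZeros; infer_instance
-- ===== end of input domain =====

-- B replaces A's prefix-sum tables by a direct scan of the four L-paths per cell (alternative
-- algorithm, not faster). Both Pythons mutate grid[i][j] in place by dividing out 2s and 5s;
-- the mutated cell is never read again, so the equivalence proved here (about the return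
-- value) reads each cell at its original value.

-- shared helper: the identical 'while v % p == 0: cnt += 1; v //= p' loop both Pythons contain
-- (returns (cnt, v)); the '2 ≤ p ∧ x ≠ 0' guard is only for totality (Python diverges on 0,
-- excluded by Pre_; p is always the literal 2 or 5)
def pvStrip (p : Int) (x : Int) : Int × Int :=
  if h : PySem.Int.mod x p = 0 ∧ x ≠ 0 ∧ 2 ≤ p then
    let r := pvStrip p (PySem.Int.floordiv x p)
    (r.1 + 1, r.2)
  else (0, x)
termination_by x.natAbs
decreasing_by
  obtain ⟨h1, h2, h3⟩ := h
  rw [PySem.Int.mod_eq_zero_iff_dvd] at h1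
  rw [PySem.Int.floordiv_eq_ediv_of_pos (by omega)]
  obtain ⟨c, rfl⟩ := h1
  rw [Int.mul_ediv_cancel_left _ (by omega)]
  have hc : c ≠ 0 := by rintro rfl; simp at h2
  have : 2 * c.natAbs ≤ p.natAbs * c.natAbs := by
    apply Nat.mul_le_mul_right; omega
  rw [Int.natAbs_mul]; omega

-- grid[i][j] (indices are loop counters, always in range under Pre_)
def pvCell (grid : List (List Int)) (i j : Nat) : Int :=
  PySem.List.pyGetD (PySem.List.pyGetD grid (i : Int) []) (j : Int) 0

-- ===== PORT A =====
-- the four mutable tables of A (pre_sum_two, pre_sum_five, twos, fives), each 2D list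
-- modelled as an update map (all reads/writes are in range)
structure PvTab where
  p2 : Nat → Nat → Int × Int
  p5 : Nat → Nat → Int × Int
  tw : Nat → Nat → Int
  fv : Nat → Nat → Int

def pvUpd {α : Type} (f : Nat → Nat → α) (a b : Nat) (v : α) : Nat → Nat → α :=
  fun x y => if x = a ∧ y = b then v else f x y

-- body of A's first nested loop at cell (i, j)
def pvStepA (grid : List (List Int)) (i j : Nat) (st : PvTab) : PvTab :=
  let s2 := pvStrip 2 (pvCell grid i j)
  let two := s2.1
  let five := (pvStrip 5 s2.2).1
  { p2 := pvUpd st.p2 (i+1) (j+1) ((st.p2 i (j+1)).1 + two, (st.p2 (i+1) j).2 + two)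
    p5 := pvUpd st.p5 (i+1) (j+1) ((st.p5 i (j+1)).1 + five, (st.p5 (i+1) j).2 + five)
    tw := pvUpd st.tw i j two
    fv := pvUpd st.fv i j five }

def pvTab0 : PvTab := ⟨fun _ _ => (0, 0), fun _ _ => (0, 0), fun _ _ => 0, fun _ _ => 0⟩

def pvBuild (grid : List (List Int)) (m n : Nat) : PvTab :=
  (List.range m).foldl
    (fun st i => (List.range n).foldl (fun st j => pvStepA grid i j st) st) pvTab0

def maxTrailingZeros (grid : List (List Int)) : Int :=
  let m := grid.length
  let n := (grid.headD []).length    -- len(grid[0]); IndexError on [] is excluded by Pre_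
  let T := pvBuild grid m n
  (List.range m).foldl (fun res i =>
    (List.range n).foldl (fun res j =>
      let ul := min ((T.p2 (i+1) (j+1)).1 + (T.p2 (i+1) (j+1)).2 - T.tw i j)
                    ((T.p5 (i+1) (j+1)).1 + (T.p5 (i+1) (j+1)).2 - T.fv i j)
      let ur := min ((T.p2 (i+1) (j+1)).1 + (T.p2 (i+1) n).2 - (T.p2 (i+1) (j+1)).2)
                    ((T.p5 (i+1) (j+1)).1 + (T.p5 (i+1) n).2 - (T.p5 (i+1) (j+1)).2)
      let dl := min ((T.p2 m (j+1)).1 - (T.p2 (i+1) (j+1)).1 + (T.p2 (i+1) (j+1)).2)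
                    ((T.p5 m (j+1)).1 - (T.p5 (i+1) (j+1)).1 + (T.p5 (i+1) (j+1)).2)
      let dr := min ((T.p2 m (j+1)).1 - (T.p2 (i+1) (j+1)).1 + (T.p2 (i+1) n).2 -
                       (T.p2 (i+1) (j+1)).2 + T.tw i j)
                    ((T.p5 m (j+1)).1 - (T.p5 (i+1) (j+1)).1 + (T.p5 (i+1) n).2 -
                       (T.p5 (i+1) (j+1)).2 + T.fv i j)
      -- max(res, max([ul, ur, dl, dr])); the list is nonempty so max? is some
      max res ((PySem.List.max? [ul, ur, dl, dr] (fun x => x)).getD 0)) res) 0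

-- ===== PORT B =====
def maxTrailingZeros_alt (grid : List (List Int)) : Int :=
  let m := grid.length
  let n := (grid.headD []).length
  -- the twos/fives matrices, modelled as functions of the cell
  let tw := fun (i j : Nat) => (pvStrip 2 (pvCell grid i j)).1
  let fv := fun (i j : Nat) => (pvStrip 5 (pvStrip 2 (pvCell grid i j)).2).1
  (List.range m).foldl (fun res i =>
    (List.range n).foldl (fun res j =>
      let u2 := ((List.range (i+1)).map (fun k => tw k j)).sum
      let u5 := ((List.range (i+1)).map (fun k => fv k j)).sum
      let d2 := ((List.range (m - i)).map (fun k => tw (i + k) j)).sum   -- range(i, m)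
      let d5 := ((List.range (m - i)).map (fun k => fv (i + k) j)).sum
      let l2 := ((List.range (j+1)).map (fun k => tw i k)).sum
      let l5 := ((List.range (j+1)).map (fun k => fv i k)).sum
      let r2 := ((List.range (n - j)).map (fun k => tw i (j + k))).sum   -- range(j, n)
      let r5 := ((List.range (n - j)).map (fun k => fv i (j + k))).sum
      let t := tw i j
      let f := fv i j
      let best := max (max (max (min (u2 + l2 - t) (u5 + l5 - f))
                                (min (u2 + r2 - t) (u5 + r5 - f)))
                           (min (d2 + l2 - t) (d5 + l5 - f)))
                      (min (d2 + r2 - t) (d5 + r5 - f))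
      max res best) res) 0

-- ===== PRECONDITION & SPEC =====
-- Pre_ excludes exactly the inputs where the Python raises or diverges: the empty grid
-- (grid[0] is an IndexError), rows shorter than the first row (IndexError), and a 0 among
-- the first len(grid[0]) entries of a row (the while loop on 0 never terminates).
def Pre_maxTrailingZeros (grid : List (List Int)) : Prop :=
  grid ≠ [] ∧ ∀ row ∈ grid, (grid.headD []).length ≤ row.length ∧
    ∀ x ∈ row.take (grid.headD []).length, x ≠ 0
instance (grid : List (List Int)) : Decidable (Pre_maxTrailingZeros grid) := by
  unfold Pre_maxTrailingZeros; infer_instance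

def pvWitness_maxTrailingZeros : List (List Int) := [[2, 5], [10, 3]]

def Spec_maxTrailingZeros (grid : List (List Int)) (out : Int) : Prop := out = maxTrailingZeros_alt grid
instance (grid : List (List Int)) (out : Int) : Decidable (Spec_maxTrailingZeros grid out) := by unfold Spec_maxTrailingZeros; infer_instance

-- ===== CLAIM (what is proved, stated in full; the proofs are below) =====
def Claim_equal_maxTrailingZeros : Prop := ∀ (grid : List (List Int)), Dom_maxTrailingZeros grid → Pre_maxTrailingZeros grid → Spec_maxTrailingZeros grid (maxTrailingZeros grid)

-- ===== LEMMAS AND PROOFS =====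

-- the 2- and 5-exponent counts of cell (i, j)
def pvC2 (grid : List (List Int)) (i j : Nat) : Int := (pvStrip 2 (pvCell grid i j)).1
def pvC5 (grid : List (List Int)) (i j : Nat) : Int := (pvStrip 5 (pvStrip 2 (pvCell grid i j)).2).1

-- prefix sum over k < a
def pvS (f : Nat → Int) (a : Nat) : Int := ((List.range a).map f).sum

lemma pvS_succ (f : Nat → Int) (a : Nat) : pvS f (a + 1) = pvS f a + f a := by
  simp [pvS, List.range_succ]

lemma pvS_split (f : Nat → Int) (i m : Nat) (h : i ≤ m) :
    pvS f m = pvS f i + ((List.range (m - i)).map (fun k => f (i + k))).sum := by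
  have hm : m = i + (m - i) := by omega
  rw [hm, pvS, List.range_add, List.map_append, List.sum_append, List.map_map]
  simp [pvS, Function.comp_def]

-- contents of a prefix table (pre_sum_two / pre_sum_five) after the first r full rows
-- and j0 further cells of row r have been processed
def pvPreSpec (c : Nat → Nat → Int) (n r j0 : Nat) (t : Nat → Nat → Int × Int) : Prop :=
  ∀ x y, t x y = if (1 ≤ x ∧ x ≤ r ∧ 1 ≤ y ∧ y ≤ n) ∨ (x = r + 1 ∧ 1 ≤ y ∧ y ≤ j0) then
    (pvS (fun k => c k (y - 1)) x, pvS (fun k => c (x - 1) k) y) else (0, 0)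

-- contents of a count table (twos / fives) at the same point
def pvCntSpec (c : Nat → Nat → Int) (n r j0 : Nat) (t : Nat → Nat → Int) : Prop :=
  ∀ x y, t x y = if (x < r ∧ y < n) ∨ (x = r ∧ y < j0) then c x y else 0

lemma pvCntSpec_step (c : Nat → Nat → Int) (n r j0 : Nat) (t : Nat → Nat → Int)
    (h : pvCntSpec c n r j0 t) (hj : j0 < n) :
    pvCntSpec c n r (j0 + 1) (pvUpd t r j0 (c r j0)) := by
  intro x y
  by_cases hxy : x = r ∧ y = j0
  · obtain ⟨rfl, rfl⟩ := hxy
    rw [pvUpd, if_pos ⟨rfl, rfl⟩, if_pos (Or.inr ⟨rfl, by omega⟩)]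
  · rw [pvUpd, if_neg hxy, h]
    split_ifs <;> first | rfl | omega

lemma pvPreSpec_step (c : Nat → Nat → Int) (n r j0 : Nat) (t : Nat → Nat → Int × Int)
    (h : pvPreSpec c n r j0 t) (hj : j0 < n) :
    pvPreSpec c n r (j0 + 1)
      (pvUpd t (r + 1) (j0 + 1) ((t r (j0 + 1)).1 + c r j0, (t (r + 1) j0).2 + c r j0)) := by
  have hcol : (t r (j0 + 1)).1 = pvS (fun k => c k j0) r := by
    rw [h]
    split_ifs with hc
    · rcases hc with hc | hc
      · simp
      · omega
    · have hr : r = 0 := by omega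
      simp [hr, pvS]
  have hrow : (t (r + 1) j0).2 = pvS (fun k => c r k) j0 := by
    rw [h]
    split_ifs with hc
    · rcases hc with hc | hc
      · omega
      · simp
    · have hj0 : j0 = 0 := by omega
      simp [hj0, pvS]
  intro x y
  by_cases hxy : x = r + 1 ∧ y = j0 + 1
  · obtain ⟨rfl, rfl⟩ := hxy
    rw [pvUpd, if_pos ⟨rfl, rfl⟩, if_pos (Or.inr ⟨rfl, by omega, by omega⟩)]
    rw [hcol, hrow]
    simp [pvS_succ]
  · rw [pvUpd, if_neg hxy, h]
    split_ifs <;> first | rfl | omega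

-- the full four-table invariant
def pvSpecAt (grid : List (List Int)) (n r j0 : Nat) (st : PvTab) : Prop :=
  pvCntSpec (pvC2 grid) n r j0 st.tw ∧ pvCntSpec (pvC5 grid) n r j0 st.fv ∧
  pvPreSpec (pvC2 grid) n r j0 st.p2 ∧ pvPreSpec (pvC5 grid) n r j0 st.p5

lemma pvSpecAt_step (grid : List (List Int)) (n r j0 : Nat) (st : PvTab)
    (h : pvSpecAt grid n r j0 st) (hj : j0 < n) :
    pvSpecAt grid n r (j0 + 1) (pvStepA grid r j0 st) := by
  obtain ⟨h1, h2, h3, h4⟩ := h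
  refine ⟨?_, ?_, ?_, ?_⟩
  · exact pvCntSpec_step _ n r j0 st.tw h1 hj
  · exact pvCntSpec_step _ n r j0 st.fv h2 hj
  · exact pvPreSpec_step _ n r j0 st.p2 h3 hj
  · exact pvPreSpec_step _ n r j0 st.p5 h4 hj

lemma pvSpecAt_inner (grid : List (List Int)) (n r : Nat) (st : PvTab)
    (h : pvSpecAt grid n r 0 st) :
    ∀ j0, j0 ≤ n →
      pvSpecAt grid n r j0 ((List.range j0).foldl (fun s j => pvStepA grid r j s) st) := by
  intro j0
  induction j0 with
  | zero => intro _; simpa using h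
  | succ j ih =>
    intro hle
    rw [List.range_succ, List.foldl_append, List.foldl_cons, List.foldl_nil]
    exact pvSpecAt_step grid n r j _ (ih (by omega)) (by omega)

lemma pvSpecAt_shift (grid : List (List Int)) (n r : Nat) (st : PvTab)
    (h : pvSpecAt grid n r n st) : pvSpecAt grid n (r + 1) 0 st := by
  obtain ⟨h1, h2, h3, h4⟩ := h
  refine ⟨?_, ?_, ?_, ?_⟩ <;> intro x y
  · rw [h1]; split_ifs <;> first | rfl | omega
  · rw [h2]; split_ifs <;> first | rfl | omega
  · rw [h3]; split_ifs <;> first | rfl | omega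
  · rw [h4]; split_ifs <;> first | rfl | omega

lemma pvBuild_spec (grid : List (List Int)) (m n : Nat) :
    pvSpecAt grid n m 0 (pvBuild grid m n) := by
  unfold pvBuild
  induction m with
  | zero =>
    refine ⟨?_, ?_, ?_, ?_⟩ <;> intro x y <;>
      · rw [if_neg (by omega)]; rfl
  | succ r ih =>
    rw [List.range_succ, List.foldl_append, List.foldl_cons, List.foldl_nil]
    exact pvSpecAt_shift grid n r _ (pvSpecAt_inner grid n r _ ih n le_rfl)

-- per-cell equality of the two loop bodies: A's table reads equal B's direct segment sums
set_option maxHeartbeats 2000000 in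
lemma pvPerCell (grid : List (List Int)) (m n i j : Nat) (hi : i < m) (hj : j < n) (res : Int) :
    (let T := pvBuild grid m n
     max res ((PySem.List.max? [
       min ((T.p2 (i+1) (j+1)).1 + (T.p2 (i+1) (j+1)).2 - T.tw i j)
           ((T.p5 (i+1) (j+1)).1 + (T.p5 (i+1) (j+1)).2 - T.fv i j),
       min ((T.p2 (i+1) (j+1)).1 + (T.p2 (i+1) n).2 - (T.p2 (i+1) (j+1)).2)
           ((T.p5 (i+1) (j+1)).1 + (T.p5 (i+1) n).2 - (T.p5 (i+1) (j+1)).2),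
       min ((T.p2 m (j+1)).1 - (T.p2 (i+1) (j+1)).1 + (T.p2 (i+1) (j+1)).2)
           ((T.p5 m (j+1)).1 - (T.p5 (i+1) (j+1)).1 + (T.p5 (i+1) (j+1)).2),
       min ((T.p2 m (j+1)).1 - (T.p2 (i+1) (j+1)).1 + (T.p2 (i+1) n).2 -
              (T.p2 (i+1) (j+1)).2 + T.tw i j)
           ((T.p5 m (j+1)).1 - (T.p5 (i+1) (j+1)).1 + (T.p5 (i+1) n).2 -
              (T.p5 (i+1) (j+1)).2 + T.fv i j)] (fun x => x)).getD 0)) =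
    (let u2 := pvS (fun k => pvC2 grid k j) (i+1)
     let u5 := pvS (fun k => pvC5 grid k j) (i+1)
     let d2 := ((List.range (m - i)).map (fun k => pvC2 grid (i + k) j)).sum
     let d5 := ((List.range (m - i)).map (fun k => pvC5 grid (i + k) j)).sum
     let l2 := pvS (fun k => pvC2 grid i k) (j+1)
     let l5 := pvS (fun k => pvC5 grid i k) (j+1)
     let r2 := ((List.range (n - j)).map (fun k => pvC2 grid i (j + k))).sum
     let r5 := ((List.range (n - j)).map (fun k => pvC5 grid i (j + k))).sum
     let t := pvC2 grid i j
     let f := pvC5 grid i j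
     max res (max (max (max (min (u2 + l2 - t) (u5 + l5 - f))
                            (min (u2 + r2 - t) (u5 + r5 - f)))
                       (min (d2 + l2 - t) (d5 + l5 - f)))
                  (min (d2 + r2 - t) (d5 + r5 - f)))) := by
  obtain ⟨htw, hfv, hp2, hp5⟩ := pvBuild_spec grid m n
  have e1 : (pvBuild grid m n).p2 (i+1) (j+1) =
      (pvS (fun k => pvC2 grid k j) (i+1), pvS (fun k => pvC2 grid i k) (j+1)) := by
    rw [hp2, if_pos (Or.inl ⟨by omega, by omega, by omega, by omega⟩)]; simp
  have e2 : (pvBuild grid m n).p2 (i+1) n =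
      (pvS (fun k => pvC2 grid k (n-1)) (i+1), pvS (fun k => pvC2 grid i k) n) := by
    rw [hp2, if_pos (Or.inl ⟨by omega, by omega, by omega, by omega⟩)]; simp
  have e3 : (pvBuild grid m n).p2 m (j+1) =
      (pvS (fun k => pvC2 grid k j) m, pvS (fun k => pvC2 grid (m-1) k) (j+1)) := by
    rw [hp2, if_pos (Or.inl ⟨by omega, by omega, by omega, by omega⟩)]; simp
  have e4 : (pvBuild grid m n).p5 (i+1) (j+1) =
      (pvS (fun k => pvC5 grid k j) (i+1), pvS (fun k => pvC5 grid i k) (j+1)) := by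
    rw [hp5, if_pos (Or.inl ⟨by omega, by omega, by omega, by omega⟩)]; simp
  have e5 : (pvBuild grid m n).p5 (i+1) n =
      (pvS (fun k => pvC5 grid k (n-1)) (i+1), pvS (fun k => pvC5 grid i k) n) := by
    rw [hp5, if_pos (Or.inl ⟨by omega, by omega, by omega, by omega⟩)]; simp
  have e6 : (pvBuild grid m n).p5 m (j+1) =
      (pvS (fun k => pvC5 grid k j) m, pvS (fun k => pvC5 grid (m-1) k) (j+1)) := by
    rw [hp5, if_pos (Or.inl ⟨by omega, by omega, by omega, by omega⟩)]; simp
  have e7 : (pvBuild grid m n).tw i j = pvC2 grid i j := by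
    rw [htw, if_pos (Or.inl ⟨hi, hj⟩)]
  have e8 : (pvBuild grid m n).fv i j = pvC5 grid i j := by
    rw [hfv, if_pos (Or.inl ⟨hi, hj⟩)]
  have sd2 : ((List.range (m - i)).map (fun k => pvC2 grid (i + k) j)).sum =
      pvS (fun k => pvC2 grid k j) m - pvS (fun k => pvC2 grid k j) i := by
    rw [pvS_split (fun k => pvC2 grid k j) i m (by omega)]; ring
  have sd5 : ((List.range (m - i)).map (fun k => pvC5 grid (i + k) j)).sum =
      pvS (fun k => pvC5 grid k j) m - pvS (fun k => pvC5 grid k j) i := by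
    rw [pvS_split (fun k => pvC5 grid k j) i m (by omega)]; ring
  have sr2 : ((List.range (n - j)).map (fun k => pvC2 grid i (j + k))).sum =
      pvS (fun k => pvC2 grid i k) n - pvS (fun k => pvC2 grid i k) j := by
    rw [pvS_split (fun k => pvC2 grid i k) j n (by omega)]; ring
  have sr5 : ((List.range (n - j)).map (fun k => pvC5 grid i (j + k))).sum =
      pvS (fun k => pvC5 grid i k) n - pvS (fun k => pvC5 grid i k) j := by
    rw [pvS_split (fun k => pvC5 grid i k) j n (by omega)]; ring
  simp only [e1, e2, e3, e4, e5, e6, e7, e8, sd2, sd5, sr2, sr5,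
    PySem.List.max?_id_cons, List.foldl_cons, List.foldl_nil, Option.getD_some]
  rw [pvS_succ (fun k => pvC2 grid k j) i, pvS_succ (fun k => pvC5 grid k j) i,
      pvS_succ (fun k => pvC2 grid i k) j, pvS_succ (fun k => pvC5 grid i k) j]
  generalize pvS (fun k => pvC2 grid k j) i = A1
  generalize pvS (fun k => pvC5 grid k j) i = A2
  generalize pvS (fun k => pvC2 grid k j) m = A3
  generalize pvS (fun k => pvC5 grid k j) m = A4
  generalize pvS (fun k => pvC2 grid i k) j = A5
  generalize pvS (fun k => pvC5 grid i k) j = A6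
  generalize pvS (fun k => pvC2 grid i k) n = A7
  generalize pvS (fun k => pvC5 grid i k) n = A8
  generalize pvC2 grid i j = A9
  generalize pvC5 grid i j = A10
  rw [show A1 + A9 + A7 - (A5 + A9) = A1 + A9 + (A7 - A5) - A9 from by ring,
      show A2 + A10 + A8 - (A6 + A10) = A2 + A10 + (A8 - A6) - A10 from by ring,
      show A3 - (A1 + A9) + (A5 + A9) = A3 - A1 + (A5 + A9) - A9 from by ring,
      show A4 - (A2 + A10) + (A6 + A10) = A4 - A2 + (A6 + A10) - A10 from by ring,
      show A3 - (A1 + A9) + A7 - (A5 + A9) + A9 = A3 - A1 + (A7 - A5) - A9 from by ring,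
      show A4 - (A2 + A10) + A8 - (A6 + A10) + A10 = A4 - A2 + (A8 - A6) - A10 from by ring]

theorem maxTrailingZeros_spec : Claim_equal_maxTrailingZeros := by
  intro grid _ _
  unfold Spec_maxTrailingZeros
  simp only [maxTrailingZeros, maxTrailingZeros_alt]
  apply PySem.List.foldl_congr_mem
  intro res i himem
  have hi : i < grid.length := List.mem_range.mp himem
  apply PySem.List.foldl_congr_mem
  intro acc j hjmem
  have hj : j < (grid.headD []).length := List.mem_range.mp hjmem
  have := pvPerCell grid grid.length (grid.headD []).length i j hi hj acc
  simpa only [pvS, pvC2, pvC5] using this
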